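-- pv_equiv track=rewrite | github.com/INE-UFSC/jogo-da-forca-22_2-grupo-1-2022-2 | app.py | verificar_match
-- ===== SOURCE A (Python) =====
-- import unicodedata
--
-- def remove_acento(palavra: str) -> str:
--     nkfd_form = unicodedata.normalize('NFKD', palavra)
--     only_ascii = nkfd_form.encode('ASCII', 'ignore')
--
--     return only_ascii.decode("utf-8")
--
-- def verificar_match(palavra: str, letras_testadas: "set[str]") -> bool:
--     """
--     Verifica se o usuário acertou a palavra escolhida com base nas letras
--     já testadas. Assume que todas as letras em 'letras_testadas' são minúsculas
--     """
--
--     palavra = remove_acento(palavra)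
--
--     if '-' in palavra:
--         aux = palavra.split('-')
--         palavra = "".join(aux)
--
--     elif " " in palavra:
--         aux = palavra.split()
--         palavra = "".join(aux)
--
--     for letra in palavra.lower():
--         if letra not in letras_testadas:
--             return False
--
--     return True
-- ===== SOURCE B (Python) =====
-- import unicodedata
--
--
-- def remove_acento(palavra: str) -> str:
--     nkfd_form = unicodedata.normalize('NFKD', palavra)
--     only_ascii = nkfd_form.encode('ASCII', 'ignore')
--     return only_ascii.decode("utf-8")
--
--
-- def verificar_match(palavra: str, letras_testadas: "set[str]") -> bool:
--     palavra = remove_acento(palavra)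
--
--     if '-' in palavra:
--         palavra = "".join(palavra.split('-'))
--     elif " " in palavra:
--         palavra = "".join(palavra.split())
--
--     # Build the word's distinct letters once, then strike out each tested
--     # letter; the word is fully matched exactly when every letter was struck.
--     restantes = list(dict.fromkeys(palavra.lower()))
--     for letra in letras_testadas:
--         if letra in restantes:
--             restantes.remove(letra)
--     return restantes == []
-- ===== Notes on version B (the rewrite author's own statement) =====
-- stated objective: alternative
-- what changed: Instead of scanning the word letter by letter with an early return on the first untested letter, B materializes the deduplicated list of the word's letters once and then iterates over letras_testadas, striking each tested letter from that list, returning whether the list was emptied.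
import Mathlib
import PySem

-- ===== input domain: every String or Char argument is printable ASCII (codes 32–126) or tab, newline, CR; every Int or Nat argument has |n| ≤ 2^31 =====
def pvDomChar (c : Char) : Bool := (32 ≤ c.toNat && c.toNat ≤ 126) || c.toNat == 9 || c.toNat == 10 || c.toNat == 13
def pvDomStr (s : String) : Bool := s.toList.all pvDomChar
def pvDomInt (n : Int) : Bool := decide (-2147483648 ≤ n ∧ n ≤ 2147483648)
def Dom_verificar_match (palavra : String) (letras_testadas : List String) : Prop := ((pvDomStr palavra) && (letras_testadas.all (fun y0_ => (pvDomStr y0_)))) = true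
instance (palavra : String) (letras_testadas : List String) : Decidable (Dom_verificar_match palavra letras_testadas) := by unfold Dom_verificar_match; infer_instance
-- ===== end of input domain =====

-- B replaces A's per-character scan of the word (early return on an untested letter)
-- with a fold over letras_testadas that deletes each tested letter from a residual
-- word and tests whether the residual is empty (objective: alternative).

-- ===== PORT A =====
-- remove_acento: NFKD normalization + ASCII-encode(ignore) is the identity on the
-- printable-ASCII domain Dom_ these theorems are about; exact there.
def remove_acento (palavra : String) : String := palavra

-- normalization step shared by both: hyphens removed, else (if a space occurs) whitespace removed
def vmNormalize (palavra : String) : String :=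
  if PySem.Str.isIn "-" palavra then
    String.ofList (PySem.Chars.join [] (PySem.Chars.splitOn palavra.toList ['-']))
  else if PySem.Str.isIn " " palavra then
    String.ofList (PySem.Chars.join [] (PySem.Chars.split₀ palavra.toList))
  else palavra

-- A's for-loop: return False on the first untested letter, True if the scan finishes
def vmLoop (cs : List Char) (letras_testadas : List String) : Bool :=
  match cs with
  | [] => true
  | c :: rest =>
    if ¬ (letras_testadas.contains (String.ofList [c])) then false
    else vmLoop rest letras_testadas

def verificar_match (palavra : String) (letras_testadas : List String) : Bool :=
  let palavra := remove_acento palavra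
  let palavra := vmNormalize palavra
  vmLoop (PySem.Str.lower palavra).toList letras_testadas

-- ===== PORT B =====
-- restantes = list(dict.fromkeys(palavra.lower())) : distinct letters, first occurrence order
-- loop body: if letra in restantes: restantes.remove(letra)
def vmStrike (restantes : List String) (letra : String) : List String :=
  if restantes.contains letra then
    ((PySem.List.remove? restantes letra).getD restantes)
  else restantes

def verificar_match_alt (palavra : String) (letras_testadas : List String) : Bool :=
  let palavra := remove_acento palavra
  let palavra := vmNormalize palavra
  let restantes := PySem.List.dedup ((PySem.Str.lower palavra).toList.map (fun c => String.ofList [c]))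
  (letras_testadas.foldl vmStrike restantes) == []

-- ===== PRECONDITION & SPEC =====
def Spec_verificar_match (palavra : String) (letras_testadas : List String) (out : Bool) : Prop := out = verificar_match_alt palavra letras_testadas
instance (palavra : String) (letras_testadas : List String) (out : Bool) : Decidable (Spec_verificar_match palavra letras_testadas out) := by unfold Spec_verificar_match; infer_instance

-- ===== CLAIM (what is proved, stated in full; the proofs are below) =====
def Claim_equal_verificar_match : Prop := ∀ (palavra : String) (letras_testadas : List String), Dom_verificar_match palavra letras_testadas → Spec_verificar_match palavra letras_testadas (verificar_match palavra letras_testadas)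

-- ===== LEMMAS AND PROOFS =====

lemma vmLoop_iff (cs : List Char) (letras : List String) :
    vmLoop cs letras = true ↔ ∀ c ∈ cs, letras.contains (String.ofList [c]) := by
  induction cs with
  | nil => simp [vmLoop]
  | cons c rest ih => simp [vmLoop, ih]

lemma vmStrike_eq_filter (r : List String) (l : String) (h : r.Nodup) :
    vmStrike r l = r.filter (fun x => !(x == l)) := by
  unfold vmStrike
  by_cases hl : l ∈ r
  · rw [if_pos (by simpa using hl), PySem.List.remove?_eq_some_erase _ _ hl]
    rw [List.Nodup.erase_eq_filter h]
    simp [bne]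
  · rw [if_neg (by simpa using hl)]
    rw [List.filter_eq_self.mpr]
    intro x hx
    simp
    rintro rfl
    exact hl hx

lemma foldl_vmStrike (letras : List String) (r : List String) (h : r.Nodup) :
    letras.foldl vmStrike r = r.filter (fun x => !(letras.contains x)) := by
  induction letras generalizing r with
  | nil => simp
  | cons l ls ih =>
      rw [List.foldl_cons, vmStrike_eq_filter r l h, ih _ (h.filter _), List.filter_filter]
      congr 1
      funext x
      by_cases hx : x = l
      · subst hx; simp
      · simp [hx]

-- ===== VERDICT (by name: the statement is the Claim_ definition above) =====
theorem verificar_match_spec : Claim_equal_verificar_match := by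
  intro palavra letras _
  unfold Spec_verificar_match verificar_match verificar_match_alt
  simp only []
  rw [foldl_vmStrike _ _ (PySem.List.nodup_dedup _), Bool.eq_iff_iff, vmLoop_iff,
      beq_iff_eq, List.filter_eq_nil_iff]
  constructor
  · intro h x hx
    rw [PySem.List.mem_dedup _ _] at hx
    obtain ⟨c, hc, rfl⟩ := List.mem_map.mp hx
    simpa using h c hc
  · intro h c hc
    have := h _ ((PySem.List.mem_dedup _ _).mpr (List.mem_map.mpr ⟨c, hc, rfl⟩))
    simpa using this
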